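-- pv_equiv track=rewrite | github.com/ruddpj/Programovanie-1 | cvicenia7.py | double_con
-- ===== SOURCE A (Python) =====
-- def double_con(s):
--     s = s.lower()
--     n = len(s)
--     a = 0
--     b = 0
--     for i in range(n - 1):
--         if s[i] == s[i + 1]:
--             a += 1
--             b = 1
--         elif b == 1:
--             b = 0
--         else:
--             a = 0
--         if a == 3:
--             return True
--     return False
-- ===== SOURCE B (Python) =====
-- def double_con(s):
--     s = s.lower()
--     idx = [i for i in range(len(s) - 1) if s[i] == s[i + 1]]
--     chain = 0
--     prev = None
--     for i in idx:
--         if prev is not None and i - prev <= 2: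
--             chain += 1
--         else:
--             chain = 1
--         if chain == 3:
--             return True
--         prev = i
--     return False
-- ===== Notes on version B (the rewrite author's own statement) =====
-- stated objective: alternative
-- what changed: Replaces A's per-character state machine (counter a plus one-shot tolerance flag b) with a two-phase scan: first collect all double positions, then run a gap scan over that list (gap <= 2 extends the chain, otherwise it restarts).
import Mathlib
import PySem

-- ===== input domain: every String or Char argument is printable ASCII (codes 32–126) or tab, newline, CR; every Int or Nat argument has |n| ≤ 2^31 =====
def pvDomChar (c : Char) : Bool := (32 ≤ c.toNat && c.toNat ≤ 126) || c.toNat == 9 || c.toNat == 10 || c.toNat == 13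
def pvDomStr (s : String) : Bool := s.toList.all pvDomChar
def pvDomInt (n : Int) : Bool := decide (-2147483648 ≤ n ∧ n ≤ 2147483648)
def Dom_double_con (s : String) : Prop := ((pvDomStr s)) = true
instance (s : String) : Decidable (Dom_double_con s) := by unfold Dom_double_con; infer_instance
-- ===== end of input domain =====

-- B precomputes the list of double positions and then scans gaps between them;
-- objective: alternative decomposition (same O(n) cost), no behaviour change.

-- ===== PORT A =====
-- A's state machine: a = chain counter, b = 1 iff the previous index was a double.
def dcLoopA (cs : List Char) : List Nat → Int → Int → Bool
  | [], _, _ => false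
  | i :: rest, a, b =>
    if cs.getD i ' ' == cs.getD (i + 1) ' ' then
      if a + 1 = 3 then true else dcLoopA cs rest (a + 1) 1
    else if b = 1 then
      if a = 3 then true else dcLoopA cs rest a 0
    else
      if (0 : Int) = 3 then true else dcLoopA cs rest 0 b

def double_con (s : String) : Bool :=
  let cs := (PySem.Str.lower s).toList
  dcLoopA cs (List.range (cs.length - 1)) 0 0

-- ===== PORT B =====
-- B's chain update for one match position i, given the previous match position.
def dcStep (i : Nat) (chain : Int) (prev : Option Nat) : Int :=
  match prev with
  | some p => if i - p ≤ 2 then chain + 1 else 1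
  | none => 1

-- B's scan over the precomputed match positions: chain counter + previous match index.
def dcLoopB : List Nat → Int → Option Nat → Bool
  | [], _, _ => false
  | i :: rest, chain, prev =>
    let chain' := dcStep i chain prev
    if chain' = 3 then true else dcLoopB rest chain' (some i)

def double_con_alt (s : String) : Bool :=
  let cs := (PySem.Str.lower s).toList
  let idx := (List.range (cs.length - 1)).filter (fun i => cs.getD i ' ' == cs.getD (i + 1) ' ')
  dcLoopB idx 0 none

-- ===== PRECONDITION & SPEC =====
def Spec_double_con (s : String) (out : Bool) : Prop := out = double_con_alt s
instance (s : String) (out : Bool) : Decidable (Spec_double_con s out) := by unfold Spec_double_con; infer_instance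

-- ===== CLAIM (what is proved, stated in full; the proofs are below) =====
def Claim_equal_double_con : Prop := ∀ (s : String), Dom_double_con s → Spec_double_con s (double_con s)

-- ===== LEMMAS AND PROOFS =====

-- The invariant relating A's state (a, b) at index i to B's state (chain, prev).
def dcInv (i : Nat) (a b chain : Int) (prev : Option Nat) : Prop :=
  match prev with
  | none => a = 0 ∧ b = 0
  | some p => p < i ∧ chain ≤ 2 ∧ 1 ≤ chain ∧
      (if i = p + 1 then a = chain ∧ b = 1
       else if i = p + 2 then a = chain ∧ b = 0
       else a = 0 ∧ b = 0)

lemma dcLoop_eq (cs : List Char) :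
    ∀ (k i : Nat) (a b chain : Int) (prev : Option Nat), dcInv i a b chain prev →
    dcLoopA cs (List.range' i k) a b =
      dcLoopB ((List.range' i k).filter
        (fun j => cs.getD j ' ' == cs.getD (j + 1) ' ')) chain prev := by
  intro k
  induction k with
  | zero => intro i a b chain prev _; simp [dcLoopA, dcLoopB]
  | succ k ih =>
    intro i a b chain prev hinv
    rw [List.range'_succ]
    by_cases hm : cs.getD i ' ' = cs.getD (i + 1) ' '
    · -- i is a double position
      have hmT : (cs.getD i ' ' == cs.getD (i + 1) ' ') = true := beq_iff_eq.mpr hm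
      have hchain : dcStep i chain prev = a + 1 := by
        unfold dcInv at hinv
        unfold dcStep
        match prev with
        | none => simp; omega
        | some p =>
          obtain ⟨hpi, hc2, hc1, hcase⟩ := hinv
          by_cases h1 : i = p + 1
          · simp only [h1] at hcase ⊢
            simp at hcase
            simp; omega
          · by_cases h2 : i = p + 2
            · simp only [h2] at hcase ⊢
              simp at hcase
              simp; omega
            · have hgt : ¬ (i - p ≤ 2) := by omega
              simp [h1, h2] at hcase
              simp [hgt]; omega
      rw [List.filter_cons, if_pos hmT]
      show (if (cs.getD i ' ' == cs.getD (i + 1) ' ') = true then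
              if a + 1 = 3 then true else dcLoopA cs (List.range' (i + 1) k) (a + 1) 1
            else _) = _
      rw [if_pos hmT]
      show _ = (if dcStep i chain prev = 3 then true
                else dcLoopB ((List.range' (i + 1) k).filter
                  (fun j => cs.getD j ' ' == cs.getD (j + 1) ' ')) (dcStep i chain prev) (some i))
      rw [hchain]
      by_cases h3 : a + 1 = 3
      · simp [h3]
      · rw [if_neg h3, if_neg h3]
        apply ih
        unfold dcInv
        have hbound : a + 1 ≤ 2 ∧ 1 ≤ a + 1 := by
          unfold dcInv at hinv
          match prev with
          | none => obtain ⟨ha, _⟩ := hinv; omega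
          | some p =>
            obtain ⟨_, hc2, hc1, hcase⟩ := hinv
            split_ifs at hcase <;> omega
        refine ⟨by omega, hbound.1, hbound.2, ?_⟩
        simp
    · -- i is not a double position
      have hmF : (cs.getD i ' ' == cs.getD (i + 1) ' ') = false := beq_eq_false_iff_ne.mpr hm
      rw [List.filter_cons, if_neg (by simp only [hmF]; exact Bool.false_ne_true)]
      show (if (cs.getD i ' ' == cs.getD (i + 1) ' ') = true then _
            else if b = 1 then
              if a = 3 then true else dcLoopA cs (List.range' (i + 1) k) a 0
            else
              if (0 : Int) = 3 then true else dcLoopA cs (List.range' (i + 1) k) 0 b) = _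
      rw [if_neg (by simp only [hmF]; exact Bool.false_ne_true)]
      unfold dcInv at hinv
      match prev with
      | none =>
        obtain ⟨ha, hb⟩ := hinv
        rw [if_neg (by omega), if_neg (by omega)]
        exact ih (i + 1) 0 b chain none (by unfold dcInv; omega)
      | some p =>
        obtain ⟨hpi, hc2, hc1, hcase⟩ := hinv
        by_cases h1 : i = p + 1
        · rw [if_pos h1] at hcase
          obtain ⟨ha, hb⟩ := hcase
          rw [if_pos hb, if_neg (by omega)]
          refine ih (i + 1) a 0 chain (some p) ?_
          unfold dcInv
          refine ⟨by omega, hc2, hc1, ?_⟩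
          rw [if_neg (by omega), if_pos (by omega)]
          exact ⟨ha, rfl⟩
        · have hni : ¬ (i = p + 1) := h1
          rw [if_neg hni] at hcase
          have hcase' : a = 0 ∧ b = 0 ∨ (i = p + 2 ∧ a = chain ∧ b = 0) := by
            by_cases h2 : i = p + 2
            · rw [if_pos h2] at hcase; exact Or.inr ⟨h2, hcase⟩
            · rw [if_neg h2] at hcase; exact Or.inl hcase
          have hb0 : b ≠ 1 := by rcases hcase' with ⟨_, hb⟩ | ⟨_, _, hb⟩ <;> omega
          rw [if_neg hb0, if_neg (by omega)]
          refine ih (i + 1) 0 b chain (some p) ?_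
          unfold dcInv
          refine ⟨by omega, hc2, hc1, ?_⟩
          rw [if_neg (by omega), if_neg (by omega)]
          refine ⟨rfl, ?_⟩
          rcases hcase' with ⟨_, hb⟩ | ⟨_, _, hb⟩ <;> exact hb

-- ===== VERDICT (by name: the statement is the Claim_ definition above) =====
theorem double_con_spec : Claim_equal_double_con := by
  intro s _
  unfold Spec_double_con double_con double_con_alt
  simp only [List.range_eq_range']
  exact dcLoop_eq _ _ 0 0 0 0 none (by unfold dcInv; exact ⟨rfl, rfl⟩)
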